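-- pv_equiv track=rewrite | github.com/AstraKlaus/Python | Инженерный калькулятор Касьянов ИТ-112.py | translate_cell_10
-- ===== SOURCE A (Python) =====
-- def translate_cell_10(one_num, ss):
--     new_one_num = 0
--     i = 0
--     while one_num != 0:
--         new_one_num += one_num % 10 * ss ** i
--         i += 1
--         one_num //= 10
--     return new_one_num
-- ===== SOURCE B (Python) =====
-- def translate_cell_10(one_num, ss):
--     def digits(n):
--         # most-significant-first decimal digits of n (empty for 0)
--         return [] if n == 0 else digits(n // 10) + [n % 10]
--     acc = 0
--     for d in digits(one_num):
--         acc = acc * ss + d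
--     return acc
-- ===== Notes on version B (the rewrite author's own statement) =====
-- stated objective: alternative
-- what changed: Builds the most-significant-first digit list recursively and folds it with Horner's rule (acc = acc*ss + d), instead of A's least-significant-first peeling loop that accumulates one_num%10 * ss**i with a per-step power.
import Mathlib
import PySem

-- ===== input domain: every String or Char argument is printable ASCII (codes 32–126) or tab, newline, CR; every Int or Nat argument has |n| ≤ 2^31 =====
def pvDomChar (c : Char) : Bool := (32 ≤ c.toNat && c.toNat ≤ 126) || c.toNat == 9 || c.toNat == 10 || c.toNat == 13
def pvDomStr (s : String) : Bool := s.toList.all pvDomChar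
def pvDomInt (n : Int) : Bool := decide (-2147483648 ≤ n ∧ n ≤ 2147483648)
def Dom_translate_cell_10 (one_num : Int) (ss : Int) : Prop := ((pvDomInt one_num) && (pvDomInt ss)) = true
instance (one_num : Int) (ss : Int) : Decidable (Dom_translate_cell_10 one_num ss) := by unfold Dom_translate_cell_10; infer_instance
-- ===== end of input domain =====

-- B replaces A's least-significant-first peeling with ss**i powers by a recursive
-- most-significant-first digit list folded with Horner's rule; equal on all one_num ≥ 0.


-- ===== PORT A =====
-- the while loop of A; `fuel` only bounds the iteration count so the function is total
-- (one_num.toNat iterations always suffice for one_num ≥ 0, the domain where A terminates)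
def pvALoop (fuel : Nat) (one_num : Int) (new_one_num : Int) (i : Nat) (ss : Int) : Int :=
  match fuel with
  | 0 => new_one_num
  | fuel + 1 =>
    if one_num = 0 then new_one_num
    else pvALoop fuel (PySem.Int.floordiv one_num 10)
          (new_one_num + PySem.Int.mod one_num 10 * ss ^ i) (i + 1) ss

def translate_cell_10 (one_num : Int) (ss : Int) : Int :=
  pvALoop one_num.toNat one_num 0 0 ss

-- ===== PORT B =====
-- helper `digits` of B: most-significant-first decimal digits (empty for 0);
-- the `n ≤ 0` guard only makes the recursion total (Python B diverges for n < 0, outside Pre_)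
def pvBDigits (n : Int) : List Int :=
  if n ≤ 0 then []
  else pvBDigits (PySem.Int.floordiv n 10) ++ [PySem.Int.mod n 10]
termination_by n.toNat
decreasing_by
  simp only [PySem.Int.floordiv, Int.fdiv_eq_ediv]
  omega

def translate_cell_10_alt (one_num : Int) (ss : Int) : Int :=
  (pvBDigits one_num).foldl (fun acc d => acc * ss + d) 0

-- ===== PRECONDITION & SPEC =====
-- A's while loop never terminates for one_num < 0 (one_num //= 10 stalls at -1), so only
-- nonnegative one_num are admitted.
def Pre_translate_cell_10 (one_num : Int) (ss : Int) : Prop := 0 ≤ one_num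
instance (one_num : Int) (ss : Int) : Decidable (Pre_translate_cell_10 one_num ss) := by
  unfold Pre_translate_cell_10; infer_instance

def pvWitness_translate_cell_10 : Int × Int := (2024, 7)

def Spec_translate_cell_10 (one_num : Int) (ss : Int) (out : Int) : Prop := out = translate_cell_10_alt one_num ss
instance (one_num : Int) (ss : Int) (out : Int) : Decidable (Spec_translate_cell_10 one_num ss out) := by unfold Spec_translate_cell_10; infer_instance

-- ===== CLAIM (what is proved, stated in full; the proofs are below) =====
def Claim_equal_translate_cell_10 : Prop := ∀ (one_num : Int) (ss : Int), Dom_translate_cell_10 one_num ss → Pre_translate_cell_10 one_num ss → Spec_translate_cell_10 one_num ss (translate_cell_10 one_num ss)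

-- ===== LEMMAS AND PROOFS =====

theorem pvBDigits_zero : pvBDigits 0 = [] := by
  rw [pvBDigits.eq_def]; simp

-- B's recurrence: Horner value H n satisfies H 0 = 0 and H n = H (n/10) * ss + n % 10 for n > 0
theorem pvB_rec (n ss : Int) (h : 0 < n) :
    translate_cell_10_alt n ss =
      translate_cell_10_alt (PySem.Int.floordiv n 10) ss * ss + PySem.Int.mod n 10 := by
  unfold translate_cell_10_alt
  rw [pvBDigits.eq_def]
  simp [h.not_ge, List.foldl_append]

-- loop invariant for A: with enough fuel, the loop adds H n * ss^i to the accumulator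
theorem pvALoop_eq (fuel : Nat) :
    ∀ (n acc : Int) (i : Nat) (ss : Int), 0 ≤ n → n.toNat ≤ fuel →
      pvALoop fuel n acc i ss = acc + translate_cell_10_alt n ss * ss ^ i := by
  induction fuel with
  | zero =>
    intro n acc i ss hn hf
    have : n = 0 := by omega
    subst this
    simp [pvALoop, translate_cell_10_alt, pvBDigits_zero]
  | succ f ih =>
    intro n acc i ss hn hf
    rw [pvALoop]
    by_cases h0 : n = 0
    · subst h0
      simp [translate_cell_10_alt, pvBDigits_zero]
    · have hpos : 0 < n := lt_of_le_of_ne hn (Ne.symm h0)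
      have hq : 0 ≤ PySem.Int.floordiv n 10 := by
        simp only [PySem.Int.floordiv, Int.fdiv_eq_ediv]; omega
      have hlt : (PySem.Int.floordiv n 10).toNat ≤ f := by
        simp only [PySem.Int.floordiv, Int.fdiv_eq_ediv]; omega
      rw [if_neg h0, ih _ _ _ _ hq hlt, pvB_rec n ss hpos]
      ring

theorem translate_cell_10_spec' (one_num ss : Int) (h : 0 ≤ one_num) :
    translate_cell_10 one_num ss = translate_cell_10_alt one_num ss := by
  unfold translate_cell_10
  rw [pvALoop_eq one_num.toNat one_num 0 0 ss h (le_refl _)]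
  ring

-- ===== VERDICT (by name: the statement is the Claim_ definition above) =====
theorem translate_cell_10_spec : Claim_equal_translate_cell_10 := by
  intro one_num ss _ hpre
  exact translate_cell_10_spec' one_num ss hpre
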